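-- pv_equiv track=rewrite | github.com/gettls/study.ps | wonseok970/2021 KAKAO BLIND RECRUITMENT/괄호 변환.py | solution
-- ===== SOURCE A (Python) =====
-- def solution(p):
--     cnt = 0
--     if p == "":
--         return ""
--
--     for i in range(len(p)):
--         if p[i] == "(":
--             cnt += 1
--         elif p[i] == ")":
--             cnt -= 1
--
--         # 문자열 분리
--         if cnt == 0:
--             u = p[:i + 1]
--             v = p[i + 1:]
--             if check_right(u) is True:
--                 return u + solution(v)
--             else:
--                 answer = "(" + solution(v) + ")" + reverse(u)
--                 return answer
--
-- def reverse(u):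
--     u = u[1:-1]
--     result = ""
--     for s in u:
--         if s == "(":
--             result += ")"
--         elif s == ")":
--             result += "("
--
--     return result
--
-- def check_right(u):
--     stack = []
--     for s in u:
--         if s == ")":
--             if len(stack) == 0:
--                 return False
--             get = stack.pop()
--             if get == "(":
--                 continue
--             elif get != "(":
--                 return False
--
--         else:
--             stack.append(s)
--
--     return True
-- ===== SOURCE B (Python) =====
-- def solution(p):
--     # Split p once into minimal balanced chunks, then fold over them
--     # right-to-left, building the result iteratively (no recursion).
--     chunks = []
--     cnt = 0
--     start = 0
--     for i, c in enumerate(p):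
--         if c == '(':
--             cnt += 1
--         elif c == ')':
--             cnt -= 1
--         if cnt == 0:
--             chunks.append(p[start:i + 1])
--             start = i + 1
--     result = ""
--     for u in reversed(chunks):
--         if _is_right(u):
--             result = u + result
--         else:
--             result = "(" + result + ")" + _flip_inner(u)
--     return result
--
-- def _is_right(u):
--     stack = []
--     for c in u:
--         if c == ')':
--             if not stack or stack.pop() != '(':
--                 return False
--         else:
--             stack.append(c)
--     return True
--
-- def _flip_inner(u):
--     return "".join(")" if c == "(" else "(" if c == ")" else "" for c in u[1:-1])
-- ===== Notes on version B (the rewrite author's own statement) =====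
-- stated objective: alternative
-- what changed: Replaces A's head-chunk recursion by a single balance-counter pass that splits p into its minimal balanced chunks, followed by an iterative right-to-left fold over that chunk list building the result string.
-- outside the precondition, e.g. on solution('('): A returns None, B returns ''; on solution('()('): A raises TypeError, B returns '()'
import Mathlib
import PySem

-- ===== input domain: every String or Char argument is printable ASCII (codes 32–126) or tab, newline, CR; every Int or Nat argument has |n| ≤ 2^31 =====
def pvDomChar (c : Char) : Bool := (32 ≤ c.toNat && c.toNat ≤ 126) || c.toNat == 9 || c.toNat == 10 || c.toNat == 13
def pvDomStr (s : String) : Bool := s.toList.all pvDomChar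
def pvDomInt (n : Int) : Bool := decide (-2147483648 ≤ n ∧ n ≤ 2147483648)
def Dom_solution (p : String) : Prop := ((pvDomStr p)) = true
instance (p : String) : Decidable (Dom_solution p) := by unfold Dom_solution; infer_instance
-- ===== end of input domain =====

-- B replaces A's head-chunk recursion by one chunk-splitting pass plus an
-- iterative right-to-left fold over the chunk list (alternative decomposition,
-- similar cost). Equivalence is over the return value on balanced inputs (Pre_).

-- ===== PORT A =====

-- A's check_right: stack of chars, top at the head (Python appends/pops at the end).
def checkRightGo : List Char → List Char → Bool
  | [], _ => true
  | c :: rest, st =>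
    if c = ')' then
      match st with
      | [] => false
      | g :: st' => if g = '(' then checkRightGo rest st' else false
    else checkRightGo rest (c :: st)

-- A's reverse: u[1:-1] (= drop 1 then dropLast, exact for every length), then the
-- accumulating loop mapping '('↦')', ')'↦'(', dropping other characters.
def flipLoop (u : List Char) : List Char :=
  u.foldl (fun r c => r ++ (if c = '(' then [')'] else if c = ')' then ['('] else [])) []

def revFlip (u : List Char) : List Char :=
  flipLoop ((u.drop 1).dropLast)

-- A's for-loop: running counter cnt, accumulated prefix acc; returns the first
-- split (u, v) where cnt hits 0, none if the loop falls through (Python: None).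
def findChunk : List Char → Int → List Char → Option (List Char × List Char)
  | [], _, _ => none
  | c :: rest, cnt, acc =>
    let cnt' := if c = '(' then cnt + 1 else if c = ')' then cnt - 1 else cnt
    if cnt' = 0 then some (acc ++ [c], rest)
    else findChunk rest cnt' (acc ++ [c])

theorem findChunk_lt : ∀ (s : List Char) (cnt : Int) (acc u v : List Char),
    findChunk s cnt acc = some (u, v) → v.length < s.length := by
  intro s
  induction s with
  | nil => intro cnt acc u v h; simp [findChunk] at h
  | cons c rest ih =>
    intro cnt acc u v h
    simp only [findChunk] at h
    by_cases hc : (if c = '(' then cnt + 1 else if c = ')' then cnt - 1 else cnt) = 0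
    · rw [if_pos hc] at h
      simp at h
      simp [← h.2]
    · rw [if_neg hc] at h
      exact Nat.lt_trans (ih _ _ _ _ h) (by simp)

-- A's solution on char lists: empty input and a fallen-through loop both yield
-- the none case (Python returns "" resp. None; the None inputs are outside Pre_).
def solA (s : List Char) : List Char :=
  match h : findChunk s 0 [] with
  | none => []
  | some (u, v) =>
    if checkRightGo u [] then u ++ solA v
    else '(' :: solA v ++ ')' :: revFlip u
termination_by s.length
decreasing_by all_goals exact findChunk_lt _ _ _ _ _ h

def solution (p : String) : String := String.mk (solA p.toList)

-- ===== PORT B =====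

-- B's _is_right (early exit folded into &&).
def isRightGo : List Char → List Char → Bool
  | [], _ => true
  | c :: rest, st =>
    if c = ')' then
      match st with
      | [] => false
      | g :: st' => g = '(' && isRightGo rest st'
    else isRightGo rest (c :: st)

-- B's _flip_inner: a join over a generator = flatMap over u[1:-1].
def flipInnerB (u : List Char) : List Char :=
  ((u.drop 1).dropLast).flatMap
    (fun c => if c = '(' then [')'] else if c = ')' then ['('] else [])

-- B's first loop: split into minimal balanced chunks (cur = current chunk so far).
def splitChunks : List Char → Int → List Char → List (List Char)
  | [], _, _ => []
  | c :: rest, cnt, cur =>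
    let cnt' := if c = '(' then cnt + 1 else if c = ')' then cnt - 1 else cnt
    if cnt' = 0 then (cur ++ [c]) :: splitChunks rest 0 []
    else splitChunks rest cnt' (cur ++ [c])

-- B's second loop body; the reversed-iteration accumulation is a foldr.
def chunkStep (u r : List Char) : List Char :=
  if isRightGo u [] then u ++ r else '(' :: r ++ ')' :: flipInnerB u

def solution_alt (p : String) : String :=
  String.mk ((splitChunks p.toList 0 []).foldr chunkStep [])

-- ===== PRECONDITION & SPEC =====
-- Pre_ excludes unbalanced inputs: there Python A returns None (no String) or
-- raises TypeError concatenating None, so no string value of A exists to match.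
def Pre_solution (p : String) : Prop := p.toList.count '(' = p.toList.count ')'
instance (p : String) : Decidable (Pre_solution p) := by unfold Pre_solution; infer_instance
def pvWitness_solution : String := "(())()"

def Spec_solution (p : String) (out : String) : Prop := out = solution_alt p
instance (p : String) (out : String) : Decidable (Spec_solution p out) := by unfold Spec_solution; infer_instance

-- ===== CLAIM (what is proved, stated in full; the proofs are below) =====
def Claim_equal_solution : Prop := ∀ (p : String), Dom_solution p → Pre_solution p → Spec_solution p (solution p)

-- ===== LEMMAS AND PROOFS =====

theorem checkRight_eq_isRight : ∀ (u st : List Char), checkRightGo u st = isRightGo u st := by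
  intro u
  induction u with
  | nil => intro st; rfl
  | cons c rest ih =>
    intro st
    simp only [checkRightGo, isRightGo]
    split
    · cases st with
      | nil => rfl
      | cons g st' =>
        by_cases hg : g = '(' <;> simp [hg, ih]
    · exact ih _

theorem flipLoop_eq_flatMap : ∀ (l acc : List Char),
    l.foldl (fun r c => r ++ (if c = '(' then [')'] else if c = ')' then ['('] else [])) acc
      = acc ++ l.flatMap (fun c => if c = '(' then [')'] else if c = ')' then ['('] else []) := by
  intro l
  induction l with
  | nil => simp
  | cons c rest ih => intro acc; simp [List.foldl, ih]

theorem revFlip_eq_flipInnerB (u : List Char) : revFlip u = flipInnerB u := by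
  rw [revFlip, flipInnerB, flipLoop, flipLoop_eq_flatMap]
  rfl

-- the two scanning loops agree: same counter, same split points
theorem splitChunks_findChunk : ∀ (s : List Char) (cnt : Int) (acc : List Char),
    (findChunk s cnt acc = none → splitChunks s cnt acc = []) ∧
    (∀ u v, findChunk s cnt acc = some (u, v) →
      splitChunks s cnt acc = u :: splitChunks v 0 []) := by
  intro s
  induction s with
  | nil =>
    intro cnt acc
    refine ⟨fun _ => rfl, ?_⟩
    intro u v h
    simp [findChunk] at h
  | cons c rest ih =>
    intro cnt acc
    simp only [findChunk, splitChunks]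
    by_cases hc : (if c = '(' then cnt + 1 else if c = ')' then cnt - 1 else cnt) = 0
    · rw [if_pos hc, if_pos hc]
      refine ⟨fun h => by simp at h, ?_⟩
      intro u v h
      simp at h
      simp [h.1, h.2]
    · rw [if_neg hc, if_neg hc]
      exact ih _ _

theorem solA_eq_fold : ∀ (n : ℕ) (s : List Char), s.length ≤ n →
    solA s = (splitChunks s 0 []).foldr chunkStep [] := by
  intro n
  induction n with
  | zero =>
    intro s hs
    have hnil : s = [] := List.eq_nil_of_length_eq_zero (Nat.le_zero.mp hs)
    subst hnil
    rw [solA]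
    rfl
  | succ n ih =>
    intro s hs
    rw [solA]
    split
    · rename_i h
      rw [(splitChunks_findChunk s 0 []).1 h]
      rfl
    · rename_i u v h
      rw [(splitChunks_findChunk s 0 []).2 u v h]
      have hv : v.length ≤ n :=
        Nat.le_of_lt_succ (Nat.lt_of_lt_of_le (findChunk_lt _ _ _ _ _ h) hs)
      simp only [List.foldr, chunkStep, ← ih v hv, checkRight_eq_isRight,
        revFlip_eq_flipInnerB]

-- ===== VERDICT (by name: the statement is the Claim_ definition above) =====
theorem solution_spec : Claim_equal_solution := by
  intro p _ _
  unfold Spec_solution solution solution_alt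
  rw [solA_eq_fold p.toList.length p.toList (le_refl _)]
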